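-- pv_equiv track=rewrite | github.com/dhilipsiva/nibli | python/lojban_classifier.py | parse_subject_tokens
-- ===== SOURCE A (Python) =====
-- CONVERTERS = frozenset(["se", "te", "ve", "xe"])
--
-- def parse_subject_tokens(tokens):
--     """Parse subject tokens → (converted, words) tuple."""
--     converted = None
--     words = []
--     for tok in tokens:
--         if tok in CONVERTERS and not words:
--             converted = tok
--         else:
--             words.append(tok)
--     return converted, words
-- ===== SOURCE B (Python) =====
-- CONVERTERS = frozenset(["se", "te", "ve", "xe"])
--
-- def parse_subject_tokens(tokens):
--     """Parse subject tokens -> (converted, words) tuple."""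
--     toks = list(tokens)
--     converted = None
--     i = 0
--     while i < len(toks) and toks[i] in CONVERTERS:
--         converted = toks[i]
--         i += 1
--     return converted, toks[i:]
-- ===== Notes on version B (the rewrite author's own statement) =====
-- stated objective: simpler
-- what changed: Replaces the single accumulate-with-flag fold (appending every non-leading token) with a two-phase scheme: a while-loop consumes the leading converter run (last one wins), then the remainder is returned by one slice instead of element-by-element appends.
import Mathlib
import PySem

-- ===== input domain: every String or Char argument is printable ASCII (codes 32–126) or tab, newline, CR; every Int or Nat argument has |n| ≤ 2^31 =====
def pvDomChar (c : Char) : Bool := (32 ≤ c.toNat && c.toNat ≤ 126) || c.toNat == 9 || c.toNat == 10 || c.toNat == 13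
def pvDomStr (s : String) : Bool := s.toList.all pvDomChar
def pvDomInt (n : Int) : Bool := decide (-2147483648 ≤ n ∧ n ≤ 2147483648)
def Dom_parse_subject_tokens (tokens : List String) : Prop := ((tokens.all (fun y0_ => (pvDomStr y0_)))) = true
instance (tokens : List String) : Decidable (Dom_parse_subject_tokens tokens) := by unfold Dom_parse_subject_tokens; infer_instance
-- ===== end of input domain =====

-- B is a different decomposition: consume the leading converter run, then slice off the rest; same result as A's accumulate-with-flag fold.

-- ===== PORT A =====
def pvConverters : List String := ["se", "te", "ve", "xe"]

-- A: one fold over the tokens carrying (converted, words)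
def parse_subject_tokens (tokens : List String) : Option String × List String :=
  tokens.foldl
    (fun st tok =>
      if tok ∈ pvConverters ∧ st.2 = [] then (some tok, st.2)
      else (st.1, st.2 ++ [tok]))
    (none, [])

-- ===== PORT B =====
-- B: while-loop over the leading converter prefix, then return the remaining slice
def pvConsume (converted : Option String) : List String → Option String × List String
  | [] => (converted, [])
  | tok :: rest =>
      if tok ∈ pvConverters then pvConsume (some tok) rest
      else (converted, tok :: rest)

def parse_subject_tokens_alt (tokens : List String) : Option String × List String :=
  pvConsume none tokens

-- ===== PRECONDITION & SPEC =====
def Spec_parse_subject_tokens (tokens : List String) (out : Option String × List String) : Prop := out = parse_subject_tokens_alt tokens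
instance (tokens : List String) (out : Option String × List String) : Decidable (Spec_parse_subject_tokens tokens out) := by unfold Spec_parse_subject_tokens; infer_instance

-- ===== CLAIM (what is proved, stated in full; the proofs are below) =====
def Claim_equal_parse_subject_tokens : Prop := ∀ (tokens : List String), Dom_parse_subject_tokens tokens → Spec_parse_subject_tokens tokens (parse_subject_tokens tokens)

-- ===== LEMMAS AND PROOFS =====

-- once words is nonempty, A's fold only appends
theorem pv_fold_append (ts : List String) (c : Option String) (w : String) (ws : List String) :
    ts.foldl
      (fun st tok =>
        if tok ∈ pvConverters ∧ st.2 = [] then (some tok, st.2)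
        else (st.1, st.2 ++ [tok]))
      (c, w :: ws) = (c, (w :: ws) ++ ts) := by
  induction ts generalizing w ws with
  | nil => simp
  | cons t ts ih =>
    simp only [List.foldl_cons]
    rw [if_neg (by simp)]
    simpa using ih w (ws ++ [t])

-- A's fold from empty words equals B's prefix-consume
theorem pv_fold_eq_consume (ts : List String) (c : Option String) :
    ts.foldl
      (fun st tok =>
        if tok ∈ pvConverters ∧ st.2 = [] then (some tok, st.2)
        else (st.1, st.2 ++ [tok]))
      (c, []) = pvConsume c ts := by
  induction ts generalizing c with
  | nil => simp [pvConsume]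
  | cons t ts ih =>
    by_cases h : t ∈ pvConverters
    · simp only [List.foldl_cons, pvConsume, if_pos h]
      rw [if_pos ⟨h, trivial⟩]
      exact ih (some t)
    · simp only [List.foldl_cons, pvConsume, if_neg h]
      rw [if_neg (by simp [h])]
      simpa using pv_fold_append ts c t []

-- ===== VERDICT (by name: the statement is the Claim_ definition above) =====
theorem parse_subject_tokens_spec : Claim_equal_parse_subject_tokens := by
  intro tokens _
  unfold Spec_parse_subject_tokens parse_subject_tokens parse_subject_tokens_alt
  exact pv_fold_eq_consume tokens none
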